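-- pv_equiv track=rewrite | github.com/ParkerZhang/SketchBook | anatomy/morse_code/cw.py | classify_morse
-- ===== SOURCE A (Python) =====
-- def classify_morse(durations):
--     # Estimate dot length as the shortest tone
--     tone_durations = [d[1] for d in durations if d[0] == 1]
--     if not tone_durations:
--         return []
--     dot_length = min(tone_durations)
--     dash_length = dot_length * 3
--     space_length = dot_length * 3  # Between letters
--     word_space = dot_length * 7
--
--     # Classify each duration
--     morse = []
--     current_letter = []
--
--     for state, duration in durations:
--         if state == 1:  # Tone
--             if duration < dash_length * 0.75:
--                 current_letter.append('.')
--             else: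
--                 current_letter.append('-')
--         elif state == 0 and current_letter:  # Silence after a tone
--             if duration > word_space * 0.75:
--                 morse.append(''.join(current_letter))
--                 morse.append(' ')  # Word break
--                 current_letter = []
--             elif duration > space_length * 0.75:
--                 morse.append(''.join(current_letter))
--                 current_letter = []
--
--     if current_letter:
--         morse.append(''.join(current_letter))
--
--     return morse
-- ===== SOURCE B (Python) =====
-- def classify_morse(durations):
--     tones = [d for s, d in durations if s == 1]
--     if not tones:
--         return []
--     dot = min(tones)
--     # Stage 1: tokenize every event independently (no running state).
--     # Tones become '.'/'-'; significant silences become break tokens 'W'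
--     # (word gap) or 'L' (letter gap); short silences produce no token.
--     # Thresholds are A's float products written exactly over the integers.
--     toks = []
--     for s, d in durations:
--         if s == 1:
--             toks.append('.' if 4 * d < 9 * dot else '-')
--         elif s == 0:
--             if 4 * d > 21 * dot:
--                 toks.append('W')
--             elif 4 * d > 9 * dot:
--                 toks.append('L')
--     # Stage 2: scan the token list for maximal runs of symbols; each run is a
--     # letter, and a 'W' immediately after a run adds a word separator.  Break
--     # tokens not directly after a run are skipped.
--     out = []
--     i, n = 0, len(toks)
--     while i < n:
--         if toks[i] in '.-':
--             j = i
--             while j < n and toks[j] in '.-':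
--                 j += 1
--             out.append(''.join(toks[i:j]))
--             if j < n and toks[j] == 'W':
--                 out.append(' ')
--             i = j
--         else:
--             i += 1
--     return out
-- ===== Notes on version B (the rewrite author's own statement) =====
-- stated objective: alternative
-- what changed: B replaces A's single stateful pass (current-letter accumulator flushed by silences) with a two-stage pipeline: every event is tokenized independently into '.'/'-'/'W'/'L' tokens (short gaps vanish), then an index scan over the token list extracts maximal symbol runs as letters, with a one-token lookahead adding ' ' when a run is followed by a word-gap token; break tokens not directly after a run are skipped.
import Mathlib
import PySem

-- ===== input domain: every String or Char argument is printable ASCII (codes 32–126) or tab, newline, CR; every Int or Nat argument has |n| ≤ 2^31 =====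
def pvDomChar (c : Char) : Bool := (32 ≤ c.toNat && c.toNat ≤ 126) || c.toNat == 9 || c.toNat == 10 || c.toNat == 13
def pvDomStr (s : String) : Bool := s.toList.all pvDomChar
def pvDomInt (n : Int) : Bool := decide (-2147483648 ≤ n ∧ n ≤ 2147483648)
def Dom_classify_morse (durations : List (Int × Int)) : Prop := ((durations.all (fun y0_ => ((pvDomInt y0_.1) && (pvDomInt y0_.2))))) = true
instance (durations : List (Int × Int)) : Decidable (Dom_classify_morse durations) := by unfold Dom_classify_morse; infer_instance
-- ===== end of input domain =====

-- B tokenizes each event independently and then scans the token list for maximal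
-- symbol runs with a one-token lookahead, instead of A's stateful flush pass.

-- ===== PORT A =====
-- Float thresholds ported exactly as integer comparisons: with |values| ≤ 2^31 all products
-- are exact in double, and duration < dot*3*0.75 ↔ 4*duration < 9*dot,
-- duration > dot*7*0.75 ↔ 4*duration > 21*dot, duration > dot*3*0.75 ↔ 4*duration > 9*dot.
def classify_morse (durations : List (Int × Int)) : List String :=
  let tone_durations := (durations.filter (fun d => d.1 == 1)).map (·.2)
  match PySem.List.min? tone_durations (fun x => x) with
  | none => []
  | some dot_length =>
    let step := fun (st : List String × List Char) (sd : Int × Int) =>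
      if sd.1 == 1 then
        if 4 * sd.2 < 9 * dot_length then (st.1, st.2 ++ ['.'])
        else (st.1, st.2 ++ ['-'])
      else if sd.1 == 0 && !st.2.isEmpty then
        if 4 * sd.2 > 21 * dot_length then (st.1 ++ [String.ofList st.2, " "], [])
        else if 4 * sd.2 > 9 * dot_length then (st.1 ++ [String.ofList st.2], [])
        else st
      else st
    let res := durations.foldl step ([], [])
    if res.2.isEmpty then res.1 else res.1 ++ [String.ofList res.2]

-- ===== PORT B =====
-- B-side helper: is a token a morse symbol (Python's `toks[i] in '.-'`)
def pvIsSym (c : Char) : Bool := c == '.' || c == '-'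

-- B-side helper: the run scan (Python's while loop over indices, written as the
-- obvious recursion on the token list; the inner `while j < n` is takeWhile/dropWhile)
def pvScan : List Char → List String
  | [] => []
  | t :: ts =>
    if pvIsSym t then
      let run := List.takeWhile pvIsSym (t :: ts)
      let rest := List.dropWhile pvIsSym (t :: ts)
      String.ofList run ::
        ((if rest.head? == some 'W' then [" "] else []) ++ pvScan rest)
    else pvScan ts
termination_by l => l.length
decreasing_by
  · simp only [List.dropWhile]
    split
    · exact Nat.lt_succ_of_le (List.length_dropWhile_le _ _)
    · simp_all
  · simp

def classify_morse_alt (durations : List (Int × Int)) : List String :=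
  let tones := (durations.filter (fun p => p.1 == 1)).map (·.2)
  match PySem.List.min? tones (fun x => x) with
  | none => []
  | some dot =>
    let toks := durations.flatMap (fun sd =>
      if sd.1 == 1 then [if 4 * sd.2 < 9 * dot then '.' else '-']
      else if sd.1 == 0 then
        if 4 * sd.2 > 21 * dot then ['W']
        else if 4 * sd.2 > 9 * dot then ['L']
        else []
      else [])
    pvScan toks

-- ===== PRECONDITION & SPEC =====
def Spec_classify_morse (durations : List (Int × Int)) (out : List String) : Prop := out = classify_morse_alt durations
instance (durations : List (Int × Int)) (out : List String) : Decidable (Spec_classify_morse durations out) := by unfold Spec_classify_morse; infer_instance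

-- ===== CLAIM (what is proved, stated in full; the proofs are below) =====
def Claim_equal_classify_morse : Prop := ∀ (durations : List (Int × Int)), Dom_classify_morse durations → Spec_classify_morse durations (classify_morse durations)

-- ===== LEMMAS AND PROOFS =====

-- intermediate reading of A's loop over the TOKEN list: a current-letter
-- accumulator fed one token at a time (bridge between the two algorithms)
def pvRunA (cur : List Char) : List Char → List String
  | [] => if cur.isEmpty then [] else [String.ofList cur]
  | t :: ts =>
    if pvIsSym t then pvRunA (cur ++ [t]) ts
    else if cur.isEmpty then pvRunA [] ts
    else if t == 'W' then String.ofList cur :: " " :: pvRunA [] ts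
    else String.ofList cur :: pvRunA [] ts

-- A's fold equals pvRunA on the tokenization
theorem pvA_fold (dot : Int) (l : List (Int × Int)) :
    ∀ (m : List String) (cur : List Char),
    (let res := l.foldl (fun st sd =>
      if sd.1 == 1 then
        if 4 * sd.2 < 9 * dot then (st.1, st.2 ++ ['.'])
        else (st.1, st.2 ++ ['-'])
      else if sd.1 == 0 && !st.2.isEmpty then
        if 4 * sd.2 > 21 * dot then (st.1 ++ [String.ofList st.2, " "], ([] : List Char))
        else if 4 * sd.2 > 9 * dot then (st.1 ++ [String.ofList st.2], [])
        else st
      else st) (m, cur)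
     if res.2.isEmpty then res.1 else res.1 ++ [String.ofList res.2])
    = m ++ pvRunA cur (l.flatMap (fun sd =>
        if sd.1 == 1 then [if 4 * sd.2 < 9 * dot then '.' else '-']
        else if sd.1 == 0 then
          if 4 * sd.2 > 21 * dot then ['W']
          else if 4 * sd.2 > 9 * dot then ['L']
          else []
        else [])) := by
  induction l with
  | nil =>
    intro m cur
    simp only [List.foldl_nil, List.flatMap_nil, pvRunA]
    by_cases h : cur.isEmpty <;> simp [h]
  | cons hd tl ih =>
    intro m cur
    simp only [List.foldl_cons, List.flatMap_cons]
    by_cases h1 : hd.1 == 1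
    · simp only [h1, if_true]
      by_cases h2 : 4 * hd.2 < 9 * dot
      · simp only [h2, if_true, List.singleton_append, pvRunA, pvIsSym]
        exact ih m (cur ++ ['.'])
      · simp only [h2, if_false, List.singleton_append, pvRunA, pvIsSym]
        exact ih m (cur ++ ['-'])
    · simp only [h1]
      by_cases h0 : hd.1 == 0
      · simp only [h0, Bool.true_and]
        by_cases hc : cur.isEmpty
        · -- current letter empty: A ignores the silence, pvRunA skips any token
          have hce : cur = [] := List.isEmpty_iff.mp hc
          subst hce
          simp only [hc, Bool.not_true, Bool.false_eq_true, if_false]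
          by_cases h3 : 4 * hd.2 > 21 * dot
          · simp only [h3, if_true, List.singleton_append, pvRunA, pvIsSym]
            exact ih m []
          · simp only [h3, if_false]
            by_cases h4 : 4 * hd.2 > 9 * dot
            · simp only [h4, if_true, List.singleton_append, pvRunA, pvIsSym]
              exact ih m []
            · simp only [h4, if_false]
              exact ih m []
        · simp only [hc, Bool.not_false, if_true]
          by_cases h3 : 4 * hd.2 > 21 * dot
          · simp only [h3, if_true, List.singleton_append, pvRunA, pvIsSym, hc,
              Bool.false_eq_true, if_false]
            rw [ih (m ++ [String.ofList cur, " "]) []]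
            simp
          · simp only [h3, if_false]
            by_cases h4 : 4 * hd.2 > 9 * dot
            · simp only [h4, if_true, List.singleton_append, pvRunA, pvIsSym, hc,
                Bool.false_eq_true, if_false]
              rw [ih (m ++ [String.ofList cur]) []]
              simp
            · simp only [h4, if_false]
              exact ih m cur
      · simp only [h0]
        exact ih m cur

-- pvRunA with a nonempty current letter: it gathers the symbol run, emits it with
-- the current prefix, consumes one break token, and restarts empty
theorem pvRunA_nonempty (toks : List Char) :
    ∀ (cur : List Char), cur ≠ [] →
    pvRunA cur toks =
      String.ofList (cur ++ toks.takeWhile pvIsSym) ::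
      (match toks.dropWhile pvIsSym with
       | [] => []
       | b :: r => (if b == 'W' then [" "] else []) ++ pvRunA [] r) := by
  induction toks with
  | nil =>
    intro cur hcur
    simp [pvRunA, List.isEmpty_iff, hcur]
  | cons t ts ih =>
    intro cur hcur
    by_cases hs : pvIsSym t
    · simp only [pvRunA, hs, if_true, List.takeWhile_cons, List.dropWhile_cons]
      rw [ih (cur ++ [t]) (by simp)]
      simp
    · have hc : cur.isEmpty = false := by simp [hcur]
      simp only [pvRunA, hs, Bool.false_eq_true, if_false, hc,
        List.takeWhile_cons, List.dropWhile_cons]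
      by_cases hw : t = 'W'
      · subst hw; simp
      · have ht : (t == 'W') = false := by simp [hw]
        simp [ht]

-- the run scan equals pvRunA started empty
theorem pvScan_eq_runA (toks : List Char) : pvScan toks = pvRunA [] toks := by
  induction hn : toks.length using Nat.strong_induction_on generalizing toks with
  | _ n ih =>
  match toks with
  | [] => simp [pvScan, pvRunA]
  | t :: ts =>
    by_cases hs : pvIsSym t
    · rw [pvScan]
      simp only [hs, if_true]
      have h1 : pvRunA ([] : List Char) (t :: ts) = pvRunA [t] ts := by
        simp [pvRunA, hs]
      rw [h1, pvRunA_nonempty ts [t] (by simp)]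
      simp only [List.takeWhile_cons, List.dropWhile_cons, hs, if_true,
        List.singleton_append]
      have hlen : (List.dropWhile pvIsSym ts).length < n := by
        subst hn
        exact Nat.lt_succ_of_le (List.length_dropWhile_le _ _)
      cases hrest : List.dropWhile pvIsSym ts with
      | nil => simp [pvScan]
      | cons b r =>
        have hb : pvIsSym b = false := by
          have := List.head?_dropWhile_not pvIsSym ts
          rw [hrest] at this
          simpa using this
        have hscan : pvScan (b :: r) = pvScan r := by
          rw [pvScan]; simp [hb]
        have hr : pvScan r = pvRunA [] r := by
          apply ih r.length _ r rfl
          rw [hrest] at hlen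
          simp only [List.length_cons] at hlen
          omega
        by_cases hw : b = 'W'
        · subst hw; simp [hscan, hr]
        · have ht : (b == 'W') = false := by simp [hw]
          simp [ht, hscan, hr]
    · rw [pvScan]
      simp only [hs, Bool.false_eq_true, if_false]
      have h2 : pvRunA ([] : List Char) (t :: ts) = pvRunA [] ts := by
        simp [pvRunA, hs]
      rw [h2]
      exact ih ts.length (by rw [← hn]; simp) ts rfl

-- ===== VERDICT (by name: the statement is the Claim_ definition above) =====
theorem classify_morse_spec : Claim_equal_classify_morse := by
  intro durations _
  show classify_morse durations = classify_morse_alt durations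
  unfold classify_morse classify_morse_alt
  cases h : PySem.List.min? ((durations.filter (fun d => d.1 == 1)).map (·.2)) (fun x => x) with
  | none => simp only [h]
  | some dot =>
    simp only [h]
    rw [pvA_fold dot durations [] []]
    rw [pvScan_eq_runA]
    rfl
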